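-- pv_equiv track=rewrite | github.com/Sanraj-Lachhiramka/Mission_Impossible_2.0 | 3_Prime Number of Set Bits in Binary Representation.py | checkPrimesetbits
-- ===== SOURCE A (Python) =====
-- def checkPrimesetbits(number):
--     i=bin(number)
--     c=0
--     for x in i:
--         if x=='1':
--             c=c+1
--     # Prime check
--     if c < 2:
--         return False
--
--     for y in range(2, int(c**0.5) + 1):
--         if c % y == 0:
--             return False
--
--     return True
-- ===== SOURCE B (Python) =====
-- def checkPrimesetbits(number):
--     # Kernighan bit-clearing popcount instead of scanning the bin() string
--     n = abs(number)
--     c = 0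
--     while n:
--         n &= n - 1
--         c += 1
--     return c >= 2 and all(c % y for y in range(2, int(c**0.5) + 1))
-- ===== Notes on version B (the rewrite author's own statement) =====
-- stated objective: alternative
-- what changed: Replaces the bin()-string construction and per-character scan with Brian Kernighan's n &= n-1 bit-clearing loop (one iteration per set bit, no string at all), and expresses the trial-division primality test as a single all() over the divisor range instead of an early-return loop.
import Mathlib
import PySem

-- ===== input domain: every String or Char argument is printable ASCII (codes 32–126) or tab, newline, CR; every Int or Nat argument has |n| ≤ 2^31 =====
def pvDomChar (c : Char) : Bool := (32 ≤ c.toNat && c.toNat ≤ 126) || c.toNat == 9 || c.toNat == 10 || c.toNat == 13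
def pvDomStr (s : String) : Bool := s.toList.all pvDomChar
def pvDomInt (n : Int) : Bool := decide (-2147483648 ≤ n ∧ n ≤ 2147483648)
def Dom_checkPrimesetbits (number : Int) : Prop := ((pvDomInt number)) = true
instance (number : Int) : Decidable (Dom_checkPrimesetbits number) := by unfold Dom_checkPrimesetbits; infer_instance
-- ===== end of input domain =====

-- B replaces A's bin()-string build-and-scan popcount by Kernighan's n &= n-1 loop and folds the
-- trial-division test into a single all(); objective: alternative (no speed claim).

-- ===== PORT A =====
-- binary digits of n, most significant first (empty for n = 0); Python's bin(number) is
-- '-'?++"0b"++digits — ported by hand (PySem has no bin), exact including the "0b" prefix.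
def pvBinDigits (n : Nat) : List Char :=
  if h : n = 0 then [] else pvBinDigits (n / 2) ++ [if n % 2 = 1 then '1' else '0']
decreasing_by exact Nat.div_lt_self (Nat.pos_of_ne_zero h) (by omega)

def pvBinStr (number : Int) : List Char :=
  (if number < 0 then ['-'] else []) ++ ['0', 'b'] ++
    (if number.natAbs = 0 then ['0'] else pvBinDigits number.natAbs)

-- A's early-return divisor loop: for y in range(...): if c % y == 0: return False / return True
def pvDivLoop (c : Int) : List Int → Bool
  | [] => true
  | y :: ys => if PySem.Int.mod c y = 0 then false else pvDivLoop c ys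

def checkPrimesetbits (number : Int) : Bool :=
  let i := pvBinStr number
  let c : Int := i.foldl (fun c x => if x = '1' then c + 1 else c) 0
  if c < 2 then false
  else
    -- int(c**0.5) ported as Nat.sqrt (exact: c here is a small nonnegative count)
    pvDivLoop c (PySem.List.pyRange 2 ((Nat.sqrt c.toNat : Int) + 1) 1)

-- ===== PORT B =====
-- while n: n &= n - 1; c += 1
def pvKern : Nat → Int → Int
  | 0, c => c
  | n + 1, c => pvKern ((n + 1) &&& n) (c + 1)
decreasing_by exact Nat.lt_succ_of_le Nat.and_le_right

def checkPrimesetbits_alt (number : Int) : Bool :=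
  let c : Int := pvKern number.natAbs 0
  decide (2 ≤ c) &&
    -- int(c**0.5) ported as Nat.sqrt (exact: c here is a small nonnegative count)
    (PySem.List.pyRange 2 ((Nat.sqrt c.toNat : Int) + 1) 1).all
      (fun y => decide (PySem.Int.mod c y ≠ 0))

-- ===== PRECONDITION & SPEC =====
def Spec_checkPrimesetbits (number : Int) (out : Bool) : Prop := out = checkPrimesetbits_alt number
instance (number : Int) (out : Bool) : Decidable (Spec_checkPrimesetbits number out) := by unfold Spec_checkPrimesetbits; infer_instance

-- ===== CLAIM (what is proved, stated in full; the proofs are below) =====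
def Claim_equal_checkPrimesetbits : Prop := ∀ (number : Int), Dom_checkPrimesetbits number → Spec_checkPrimesetbits number (checkPrimesetbits number)

-- ===== LEMMAS AND PROOFS =====

theorem pv_land_odd (k : Nat) : (2*k+1) &&& (2*k) = 2*k := by
  apply Nat.eq_of_testBit_eq; intro i
  rw [Nat.testBit_land]
  cases i with
  | zero => simp [Nat.testBit_zero]
  | succ j =>
    rw [Nat.testBit_succ, Nat.testBit_succ]
    have h1 : (2*k+1)/2 = k := by omega
    have h2 : (2*k)/2 = k := by omega
    rw [h1, h2, Bool.and_self]

theorem pv_land_even (k : Nat) (hk : 1 ≤ k) : (2*k) &&& (2*k-1) = 2*(k &&& (k-1)) := by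
  apply Nat.eq_of_testBit_eq; intro i
  rw [Nat.testBit_land]
  cases i with
  | zero => simp [Nat.testBit_zero]
  | succ j =>
    rw [Nat.testBit_succ, Nat.testBit_succ, Nat.testBit_succ]
    have h1 : (2*k)/2 = k := by omega
    have h2 : (2*k-1)/2 = k-1 := by omega
    have h3 : (2*(k &&& (k-1)))/2 = k &&& (k-1) := by omega
    rw [h1, h2, h3, Nat.testBit_land]

theorem pv_bc_double (m : Nat) : PySem.Int.bitCount ((2*m : Nat) : Int) = PySem.Int.bitCount (m : Int) := by
  rcases Nat.eq_zero_or_pos m with h | h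
  · subst h; rfl
  · have := PySem.Int.bitCount_natCast (m := 2*m) (by omega)
    have h2 : (2*m) % 2 = 0 := by omega
    have h3 : (2*m) / 2 = m := by omega
    rw [this, h2, h3]; omega

theorem pv_bc_double_succ (m : Nat) : PySem.Int.bitCount ((2*m+1 : Nat) : Int) = PySem.Int.bitCount (m : Int) + 1 := by
  have := PySem.Int.bitCount_natCast (m := 2*m+1) (by omega)
  have h2 : (2*m+1) % 2 = 1 := by omega
  have h3 : (2*m+1) / 2 = m := by omega
  rw [this, h2, h3, Nat.add_comm]

theorem pv_bc_land (n : Nat) (hn : 1 ≤ n) :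
    PySem.Int.bitCount ((n &&& (n-1) : Nat) : Int) + 1 = PySem.Int.bitCount (n : Int) := by
  induction n using Nat.strong_induction_on with
  | _ n ih =>
    rcases Nat.even_or_odd n with ⟨k, hk⟩ | ⟨k, hk⟩
    · -- n = 2k, k ≥ 1
      have hk1 : 1 ≤ k := by omega
      have he : n &&& (n-1) = 2*(k &&& (k-1)) := by
        have : n = 2*k := by omega
        subst this; exact pv_land_even k hk1
      rw [he, pv_bc_double, show n = 2*k by omega, pv_bc_double]
      exact ih k (by omega) hk1
    · -- n = 2k+1
      have he : n &&& (n-1) = 2*k := by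
        have : n = 2*k+1 := by omega
        subst this
        have : 2*k+1-1 = 2*k := by omega
        rw [this]; exact pv_land_odd k
      rw [he, pv_bc_double, show n = 2*k+1 by omega, pv_bc_double_succ]

theorem pv_kern_eq (n : Nat) : ∀ c : Int, pvKern n c = c + (PySem.Int.bitCount (n : Int) : Int) := by
  induction n using Nat.strong_induction_on with
  | _ n ih =>
    intro c
    match n with
    | 0 => simp [pvKern]
    | t + 1 =>
      rw [pvKern, ih ((t+1) &&& t) (Nat.lt_succ_of_le Nat.and_le_right)]
      have := pv_bc_land (t+1) (by omega)
      have ht : (t+1) - 1 = t := by omega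
      rw [ht] at this
      omega

theorem pv_digits_count (m : Nat) :
    (pvBinDigits m).countP (fun x => decide (x = '1')) = PySem.Int.bitCount (m : Int) := by
  induction m using Nat.strong_induction_on with
  | _ m ih =>
    rcases Nat.eq_zero_or_pos m with h | h
    · subst h; rw [pvBinDigits]; simp
    · rw [pvBinDigits, dif_neg (Nat.pos_iff_ne_zero.mp h), List.countP_append,
        ih (m/2) (Nat.div_lt_self h (by omega)), PySem.Int.bitCount_natCast h]
      rcases Nat.mod_two_eq_zero_or_one m with h2 | h2 <;> simp [h2] <;> omega

theorem pv_divLoop_all (c : Int) (ys : List Int) :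
    pvDivLoop c ys = ys.all (fun y => decide (PySem.Int.mod c y ≠ 0)) := by
  induction ys with
  | nil => rfl
  | cons y ys ih =>
    rw [pvDivLoop, List.all_cons, ih]
    by_cases h : PySem.Int.mod c y = 0 <;> simp [h]

-- A's counted value over the whole bin() string equals the popcount of |number|
theorem pv_count_binStr (number : Int) :
    ((pvBinStr number).foldl (fun c x => if x = '1' then c + 1 else c) 0 : Int)
      = (PySem.Int.bitCount ((number.natAbs : Nat) : Int) : Int) := by
  have hfun : (fun (c : Int) x => if x = '1' then c + 1 else c)
      = (fun acc x => if (fun x => decide (x = '1')) x = true then acc + 1 else acc) := by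
    funext c x; simp
  rw [hfun, PySem.List.foldl_count_if (fun x => decide (x = '1'))]
  unfold pvBinStr
  rcases Nat.eq_zero_or_pos number.natAbs with h | h
  · rw [h]; split <;> simp
  · rw [if_neg (Nat.pos_iff_ne_zero.mp h)]
    simp only [List.countP_append, pv_digits_count]
    split <;> simp

-- ===== VERDICT (by name: the statement is the Claim_ definition above) =====
theorem checkPrimesetbits_spec : Claim_equal_checkPrimesetbits := by
  intro number _
  unfold Spec_checkPrimesetbits checkPrimesetbits checkPrimesetbits_alt
  dsimp only
  rw [pv_count_binStr, pv_kern_eq number.natAbs 0, pv_divLoop_all]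
  simp only [Int.zero_add]
  by_cases hc : (2:Int) ≤ ((PySem.Int.bitCount ((number.natAbs : Nat) : Int) : Int))
  · rw [if_neg (by omega), decide_eq_true hc, Bool.true_and]
  · rw [if_pos (by omega), decide_eq_false hc, Bool.false_and]
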